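-- pv_equiv track=rewrite | github.com/idvorkin/idvorkin.github.io | build_back_links.py | rebuild_incoming_links
-- ===== SOURCE A (Python) =====
-- from collections import defaultdict
--
-- def rebuild_incoming_links(data):
--     """Rebuild incoming links based on outgoing links."""
--     incoming_links = defaultdict(list)
--     updated_count = 0
--
--     # Collect all outgoing links
--     for url, page_data in data["url_info"].items():
--         outgoing = page_data.get("outgoing_links", [])
--         for link in outgoing:
--             incoming_links[link].append(url)
--
--     # Update incoming_links for each page
--     for url in data["url_info"]:
--         if url in incoming_links:
--             new_incoming = sorted(list(set(incoming_links[url])))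
--             current_incoming = data["url_info"][url].get("incoming_links", [])
--
--             if sorted(current_incoming) != new_incoming:
--                 data["url_info"][url]["incoming_links"] = new_incoming
--                 updated_count += 1
--
--     return updated_count
-- ===== SOURCE B (Python) =====
-- def rebuild_incoming_links(data):
--     """Rebuild incoming links based on outgoing links."""
--     updated_count = 0
--     pages = data["url_info"]
--     for url, page_data in pages.items():
--         sources = sorted({src for src, pd in pages.items()
--                           if url in pd.get("outgoing_links", [])})
--         if sources and sorted(page_data.get("incoming_links", [])) != sources:
--             page_data["incoming_links"] = sources
--             updated_count += 1
--     return updated_count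
-- ===== Notes on version B (the rewrite author's own statement) =====
-- stated objective: simpler
-- what changed: Drops the prebuilt defaultdict index entirely: for each page B rescans all pages' outgoing_links to collect the set of sources linking to it, so the whole function is one loop with an inner scan instead of an indexing pass plus a separate update pass.
import Mathlib
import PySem

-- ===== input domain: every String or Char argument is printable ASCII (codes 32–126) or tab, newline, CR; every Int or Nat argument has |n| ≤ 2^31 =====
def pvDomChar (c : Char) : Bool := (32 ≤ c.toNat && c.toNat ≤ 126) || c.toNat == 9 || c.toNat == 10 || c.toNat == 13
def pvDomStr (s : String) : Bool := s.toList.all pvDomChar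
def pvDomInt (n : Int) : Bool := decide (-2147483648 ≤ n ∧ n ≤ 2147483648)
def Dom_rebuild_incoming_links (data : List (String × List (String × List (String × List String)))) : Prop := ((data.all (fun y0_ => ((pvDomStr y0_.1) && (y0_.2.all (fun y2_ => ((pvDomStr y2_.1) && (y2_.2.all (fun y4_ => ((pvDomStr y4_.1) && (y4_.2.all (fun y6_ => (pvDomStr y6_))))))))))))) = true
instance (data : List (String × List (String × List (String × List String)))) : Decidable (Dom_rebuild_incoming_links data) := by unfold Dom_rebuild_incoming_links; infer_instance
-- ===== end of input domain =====

-- B drops A's prebuilt defaultdict index: it rescans all pages' outgoing links once per page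
-- (one loop with an inner scan instead of an indexing pass plus an update pass); objective: simpler.
-- Both Pythons mutate data["url_info"][url]["incoming_links"] identically; the equivalence proved
-- here is about the RETURN value (the update count).

-- ===== PORT A =====
def rebuild_incoming_links (data : List (String × List (String × List (String × List String)))) : Int :=
  match (PySem.Dict.ofList data).get? "url_info" with
  | none => 0  -- Python raises KeyError here; excluded by Pre_
  | some urlinfoList =>
    let urlinfo := PySem.Dict.ofList urlinfoList
    -- incoming_links = defaultdict(list); for url, page_data in ….items(): for link in outgoing: incoming_links[link].append(url)
    let incoming : PySem.Dict String (List String) :=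
      urlinfo.items.foldl
        (fun d p =>
          ((PySem.Dict.ofList p.2).getD "outgoing_links" []).foldl
            (fun d link => d.modify link [] (fun xs => xs ++ [p.1])) d)
        PySem.Dict.empty
    -- for url in data["url_info"]: …
    urlinfo.keys.foldl
      (fun count url =>
        if incoming.contains url then
          let new_incoming := PySem.List.sorted (PySem.Set.ofList (incoming.getD url [])) (fun x => x) false
          let current_incoming := (PySem.Dict.ofList (urlinfo.getD url [])).getD "incoming_links" []
          if PySem.List.sorted current_incoming (fun x => x) false ≠ new_incoming then count + 1 else count
        else count)
      0

-- ===== PORT B =====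
def rebuild_incoming_links_alt (data : List (String × List (String × List (String × List String)))) : Int :=
  match (PySem.Dict.ofList data).get? "url_info" with
  | none => 0  -- Python raises KeyError here; excluded by Pre_
  | some urlinfoList =>
    let pages := (PySem.Dict.ofList urlinfoList).items
    -- for url, page_data in pages.items(): sources = sorted({src for src, pd in pages.items() if url in pd.get("outgoing_links", [])})
    pages.foldl
      (fun count p =>
        let sources := PySem.List.sorted
          (PySem.Set.ofList
            ((pages.filter (fun q => ((PySem.Dict.ofList q.2).getD "outgoing_links" []).contains p.1)).map (fun q => q.1)))
          (fun x => x) false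
        if sources ≠ [] ∧ PySem.List.sorted ((PySem.Dict.ofList p.2).getD "incoming_links" []) (fun x => x) false ≠ sources
        then count + 1 else count)
      0

-- ===== PRECONDITION & SPEC =====
-- Pre_ excludes exactly the inputs missing the "url_info" key, on which Python A raises KeyError.
def Pre_rebuild_incoming_links (data : List (String × List (String × List (String × List String)))) : Prop :=
  ((PySem.Dict.ofList data).get? "url_info").isSome = true
instance (data : List (String × List (String × List (String × List String)))) : Decidable (Pre_rebuild_incoming_links data) := by unfold Pre_rebuild_incoming_links; infer_instance

def pvWitness_rebuild_incoming_links : (List (String × List (String × List (String × List String)))) :=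
  [("url_info", [("a", [("outgoing_links", ["b"])]), ("b", [])])]

def Spec_rebuild_incoming_links (data : List (String × List (String × List (String × List String)))) (out : Int) : Prop := out = rebuild_incoming_links_alt data
instance (data : List (String × List (String × List (String × List String)))) (out : Int) : Decidable (Spec_rebuild_incoming_links data out) := by unfold Spec_rebuild_incoming_links; infer_instance

-- ===== CLAIM (what is proved, stated in full; the proofs are below) =====
def Claim_equal_rebuild_incoming_links : Prop := ∀ (data : List (String × List (String × List (String × List String)))), Dom_rebuild_incoming_links data → Pre_rebuild_incoming_links data → Spec_rebuild_incoming_links data (rebuild_incoming_links data)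

-- ===== LEMMAS AND PROOFS =====

-- the list of (link, source-url) pairs A's first pass walks through, flattened
def pvPairs (pages : List (String × List (String × List String))) : List (String × String) :=
  pages.flatMap (fun q => ((PySem.Dict.ofList q.2).getD "outgoing_links" []).map (fun l => (l, q.1)))

-- A's nested index-building loop is the flat modify-loop over pvPairs
lemma pv_fold_nested (pages : List (String × List (String × List String)))
    (d : PySem.Dict String (List String)) :
    pages.foldl
      (fun d p =>
        ((PySem.Dict.ofList p.2).getD "outgoing_links" []).foldl
          (fun d link => d.modify link [] (fun xs => xs ++ [p.1])) d)
      d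
    = (pvPairs pages).foldl (fun d pr => d.modify pr.1 [] (fun xs => xs ++ [pr.2])) d := by
  induction pages generalizing d with
  | nil => rfl
  | cons p t ih => simp [pvPairs, List.foldl_append, List.foldl_map, ih]

lemma pv_filter_map_pairs (xs : List String) (q u : String) :
    ((xs.map (fun l => (l, q))).filter (fun pr => pr.1 == u)).map (fun pr => pr.2)
    = List.replicate (xs.count u) q := by
  induction xs with
  | nil => rfl
  | cons x t ih =>
    by_cases h : x = u <;> simp [h, ih, List.replicate_succ]

lemma pv_foldl_add_replicate (n : Nat) (s : PySem.Set String) (x : String) :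
    (List.replicate n x).foldl PySem.Set.add s = if n = 0 then s else s.add x := by
  induction n generalizing s with
  | zero => rfl
  | succ m ih => cases m <;> simp_all [List.replicate_succ]

-- the deduped source set A extracts from its index equals B's per-page scan, as a list
lemma pv_sources_eq (pages : List (String × List (String × List String))) (u : String)
    (s : PySem.Set String) :
    (pages.flatMap (fun q => List.replicate (((PySem.Dict.ofList q.2).getD "outgoing_links" []).count u) q.1)).foldl PySem.Set.add s
    = ((pages.filter (fun q => ((PySem.Dict.ofList q.2).getD "outgoing_links" []).contains u)).map (fun q => q.1)).foldl PySem.Set.add s := by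
  induction pages generalizing s with
  | nil => rfl
  | cons p t ih =>
    by_cases h : u ∈ (PySem.Dict.ofList p.2).getD "outgoing_links" [] <;>
      simp [h, List.foldl_append, pv_foldl_add_replicate, List.count_eq_zero, ih]

lemma pv_ofList_eq_nil (xs : List String) : PySem.Set.ofList xs = [] ↔ xs = [] := by
  constructor
  · intro h
    rw [List.eq_nil_iff_forall_not_mem]
    intro x hx
    have := (PySem.Set.mem_ofList xs x).mpr hx
    simp [h] at this
  · intro h; subst h; rfl

-- A's index value at key u, rewritten page by page
lemma pv_index_val (pages : List (String × List (String × List String))) (u : String) :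
    ((pvPairs pages).filter (fun pr => pr.1 == u)).map (fun pr => pr.2)
    = pages.flatMap (fun q => List.replicate (((PySem.Dict.ofList q.2).getD "outgoing_links" []).count u) q.1) := by
  induction pages with
  | nil => rfl
  | cons p t ih =>
    simp [pvPairs, List.filter_append, List.map_append, pv_filter_map_pairs] at *
    simp [ih]

-- A's index contains u iff some page links to u
lemma pv_index_keys (pages : List (String × List (String × List String))) (u : String) :
    ((pvPairs pages).foldl (fun d pr => d.modify pr.1 [] (fun xs => xs ++ [pr.2]))
        (PySem.Dict.empty : PySem.Dict String (List String))).contains u = true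
      ↔ ∃ q ∈ pages, u ∈ (PySem.Dict.ofList q.2).getD "outgoing_links" [] := by
  rw [PySem.Dict.contains_iff_mem_keys,
      PySem.Dict.keys_foldl_modify_key (pvPairs pages) (fun pr => pr.1) []
        (fun _ pr => fun xs => xs ++ [pr.2]) PySem.Dict.empty]
  have hupd : PySem.Set.update (PySem.Dict.empty : PySem.Dict String (List String)).keys
      ((pvPairs pages).map (fun pr => pr.1))
      = PySem.Set.ofList ((pvPairs pages).map (fun pr => pr.1)) := by
    rw [PySem.Set.ofList_eq_foldl]; rfl
  rw [hupd, PySem.Set.mem_ofList]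
  simp [pvPairs, List.mem_flatMap]

-- the two per-page loop bodies agree
lemma pv_core (ui : PySem.Dict String (List (String × List String))) (hnd : ui.keys.Nodup) :
    ui.keys.foldl
      (fun count url =>
        if (ui.items.foldl
              (fun d p =>
                ((PySem.Dict.ofList p.2).getD "outgoing_links" []).foldl
                  (fun d link => d.modify link [] (fun xs => xs ++ [p.1])) d)
              (PySem.Dict.empty : PySem.Dict String (List String))).contains url then
          let new_incoming := PySem.List.sorted (PySem.Set.ofList
            ((ui.items.foldl
              (fun d p =>
                ((PySem.Dict.ofList p.2).getD "outgoing_links" []).foldl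
                  (fun d link => d.modify link [] (fun xs => xs ++ [p.1])) d)
              (PySem.Dict.empty : PySem.Dict String (List String))).getD url [])) (fun x => x) false
          let current_incoming := (PySem.Dict.ofList (ui.getD url [])).getD "incoming_links" []
          if PySem.List.sorted current_incoming (fun x => x) false ≠ new_incoming then count + 1 else count
        else count)
      (0 : Int)
    = ui.items.foldl
      (fun count p =>
        let sources := PySem.List.sorted
          (PySem.Set.ofList
            ((ui.items.filter (fun q => ((PySem.Dict.ofList q.2).getD "outgoing_links" []).contains p.1)).map (fun q => q.1)))
          (fun x => x) false
        if sources ≠ [] ∧ PySem.List.sorted ((PySem.Dict.ofList p.2).getD "incoming_links" []) (fun x => x) false ≠ sources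
        then count + 1 else count)
      (0 : Int) := by
  have hkeys : ui.keys = ui.items.map (fun p => p.1) := rfl
  rw [hkeys, List.foldl_map]
  apply PySem.List.foldl_congr_mem
  intro acc p hp
  rw [pv_fold_nested]
  -- B's source set equals A's deduped index entry
  have hsrc : PySem.Set.ofList
      (((pvPairs ui.items).foldl (fun d pr => d.modify pr.1 [] (fun xs => xs ++ [pr.2]))
        (PySem.Dict.empty : PySem.Dict String (List String))).getD p.1 [])
      = PySem.Set.ofList
        ((ui.items.filter (fun q => ((PySem.Dict.ofList q.2).getD "outgoing_links" []).contains p.1)).map (fun q => q.1)) := by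
    rw [PySem.Dict.getD_foldl_modify_append, PySem.Dict.getD_empty]
    rw [List.nil_append, pv_index_val, PySem.Set.ofList_eq_foldl, PySem.Set.ofList_eq_foldl,
        pv_sources_eq]
  -- A reads the page dict back from url_info; it is p.2
  have hpage : ui.getD p.1 [] = p.2 := by
    exact PySem.Dict.getD_of_mem_items ui (by simpa using hp) hnd []
  rw [hsrc, hpage]
  by_cases hex : ∃ q ∈ ui.items, p.1 ∈ (PySem.Dict.ofList q.2).getD "outgoing_links" []
  · have hc := (pv_index_keys ui.items p.1).mpr hex
    have hne : (ui.items.filter (fun q => ((PySem.Dict.ofList q.2).getD "outgoing_links" []).contains p.1)).map (fun q => q.1) ≠ [] := by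
      simp only [ne_eq, List.map_eq_nil_iff, List.filter_eq_nil_iff]
      obtain ⟨q, hq, hmem⟩ := hex
      intro hall
      exact hall q hq (by simpa using hmem)
    have hsne : PySem.List.sorted
        (PySem.Set.ofList ((ui.items.filter (fun q => ((PySem.Dict.ofList q.2).getD "outgoing_links" []).contains p.1)).map (fun q => q.1)))
        (fun x => x) false ≠ [] := by
      rw [ne_eq, PySem.List.sorted_eq_nil_iff, pv_ofList_eq_nil]
      exact hne
    simp only [hc, if_true, hsne, ne_eq, not_false_eq_true, true_and]
  · have hc : ¬ ((pvPairs ui.items).foldl (fun d pr => d.modify pr.1 [] (fun xs => xs ++ [pr.2]))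
        (PySem.Dict.empty : PySem.Dict String (List String))).contains p.1 = true :=
      fun h => hex ((pv_index_keys ui.items p.1).mp h)
    have hse : (ui.items.filter (fun q => decide (p.1 ∈ (PySem.Dict.ofList q.2).getD "outgoing_links" []))).map (fun q => q.1) = [] := by
      simp only [List.map_eq_nil_iff, List.filter_eq_nil_iff]
      intro q hq hcont
      exact hex ⟨q, hq, by simpa using hcont⟩
    simp [hc, hse, PySem.List.sorted_eq_nil_iff]

-- ===== VERDICT (by name: the statement is the Claim_ definition above) =====
theorem rebuild_incoming_links_spec : Claim_equal_rebuild_incoming_links := by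
  intro data _hdom _hpre
  unfold Spec_rebuild_incoming_links rebuild_incoming_links rebuild_incoming_links_alt
  cases h : (PySem.Dict.ofList data).get? "url_info" with
  | none => rfl
  | some uiList =>
    exact pv_core (PySem.Dict.ofList uiList) (PySem.Dict.nodup_keys_ofList uiList)
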